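-- pv_equiv track=rewrite | github.com/joojung88/fetch_rewards | cleanup_function.py | remove_articles
-- ===== SOURCE A (Python) =====
-- def remove_articles(my_list):
--     i = 0
--     while i < len(my_list):
--         if my_list[i] == "the" or my_list[i] == "a" or my_list[i] == "an":
--             del my_list[i]
--             i = i
--         else:
--             i = i + 1
--     return my_list
-- ===== SOURCE B (Python) =====
-- def remove_articles(my_list):
--     # Single forward pass with a write pointer; mutates the same list object
--     # in place and truncates the leftover tail, like A does via repeated del.
--     j = 0
--     for i in range(len(my_list)):
--         x = my_list[i]
--         if x != "the" and x != "a" and x != "an":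
--             my_list[j] = x
--             j += 1
--     del my_list[j:]
--     return my_list
-- ===== Notes on version B (the rewrite author's own statement) =====
-- stated objective: faster
-- what changed: Replaces the while loop with repeated O(n) del-at-index by a single forward compaction pass with a write pointer followed by one tail truncation.
import Mathlib
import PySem

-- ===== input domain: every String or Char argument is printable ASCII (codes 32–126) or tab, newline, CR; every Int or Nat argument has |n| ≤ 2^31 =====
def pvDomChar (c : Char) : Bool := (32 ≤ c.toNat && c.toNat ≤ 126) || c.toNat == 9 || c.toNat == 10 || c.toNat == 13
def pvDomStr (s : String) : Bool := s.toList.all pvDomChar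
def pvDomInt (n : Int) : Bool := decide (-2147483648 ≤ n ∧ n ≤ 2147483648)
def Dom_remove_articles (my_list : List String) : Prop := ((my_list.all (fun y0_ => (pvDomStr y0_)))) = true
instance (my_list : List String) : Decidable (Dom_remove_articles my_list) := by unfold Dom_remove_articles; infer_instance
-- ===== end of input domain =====

set_option maxRecDepth 8000


-- B replaces A's while loop with repeated del-at-index by a single compaction pass with a
-- write pointer plus one tail truncation (faster). Both Pythons mutate the argument in
-- place and return the same object; the equivalence proved here is about the return value.

-- ===== PORT A =====
-- while loop: state (my_list, i); 'del my_list[i]' = eraseIdx; terminates since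
-- length - i decreases each iteration.
def removeArticlesLoop (my_list : List String) (i : Nat) : List String :=
  if h : i < my_list.length then
    if my_list[i] = "the" ∨ my_list[i] = "a" ∨ my_list[i] = "an" then
      removeArticlesLoop (my_list.eraseIdx i) i
    else
      removeArticlesLoop my_list (i + 1)
  else my_list
termination_by my_list.length - i
decreasing_by
  · have := List.length_eraseIdx_of_lt (l := my_list) (i := i) h; omega
  · omega

def remove_articles (my_list : List String) : List String :=
  removeArticlesLoop my_list 0

-- ===== PORT B =====
-- for i in range(len): read my_list[i], conditionally write at j ≤ i and j += 1; finally
-- del my_list[j:] = take j. In Python the writes land only at positions already read, so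
-- every read sees the original list; the fold therefore reads the original list exactly.
def remove_articles_alt (my_list : List String) : List String :=
  let st := my_list.foldl
    (fun (st : List String × Nat) x =>
      if x ≠ "the" ∧ x ≠ "a" ∧ x ≠ "an" then (st.1.set st.2 x, st.2 + 1) else st)
    (my_list, 0)
  st.1.take st.2

-- ===== PRECONDITION & SPEC =====
def Spec_remove_articles (my_list : List String) (out : List String) : Prop := out = remove_articles_alt my_list
instance (my_list : List String) (out : List String) : Decidable (Spec_remove_articles my_list out) := by unfold Spec_remove_articles; infer_instance

-- ===== CLAIM (what is proved, stated in full; the proofs are below) =====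
def Claim_equal_remove_articles : Prop := ∀ (my_list : List String), Dom_remove_articles my_list → Spec_remove_articles my_list (remove_articles my_list)

-- ===== LEMMAS AND PROOFS =====

def pvKeep (x : String) : Bool := x ≠ "the" && x ≠ "a" && x ≠ "an"

-- A's loop computes take i ++ filter of the rest.
theorem removeArticlesLoop_eq_filter :
    ∀ (n : Nat) (l : List String) (i : Nat), l.length - i ≤ n → i ≤ l.length →
      removeArticlesLoop l i = l.take i ++ (l.drop i).filter pvKeep := by
  intro n
  induction n with
  | zero =>
    intro l i hn hi
    have hi' : i = l.length := by omega
    rw [removeArticlesLoop]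
    simp [hi']
  | succ n ih =>
    intro l i hn hi
    rw [removeArticlesLoop]
    by_cases h : i < l.length
    · simp only [h, dif_pos]
      have hdrop : l.drop i = l[i] :: l.drop (i + 1) := List.drop_eq_getElem_cons h
      by_cases ha : l[i] = "the" ∨ l[i] = "a" ∨ l[i] = "an"
      · simp only [ha, if_pos]
        have herase : l.eraseIdx i = l.take i ++ l.drop (i + 1) :=
          List.eraseIdx_eq_take_drop_succ l i
        have hlen : (l.eraseIdx i).length = l.length - 1 :=
          List.length_eraseIdx_of_lt h
        have h1 : (l.eraseIdx i).length - i ≤ n := by omega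
        have h2 : i ≤ (l.eraseIdx i).length := by omega
        rw [ih _ _ h1 h2, herase]
        have htake : i ≤ (l.take i).length := by simp; omega
        rw [List.take_append_of_le_length htake, List.drop_append_of_le_length htake]
        have hk : pvKeep l[i] = false := by
          rcases ha with h' | h' | h' <;> simp [pvKeep, h']
        rw [hdrop, List.filter_cons, hk]
        simp
      · simp only [ha, if_neg, not_false_iff]
        have h1 : l.length - (i + 1) ≤ n := by omega
        rw [ih _ _ h1 (by omega)]
        have hk : pvKeep l[i] = true := by
          simp [pvKeep]; tauto
        have htake : l.take (i + 1) = l.take i ++ [l[i]] := by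
          rw [List.take_add_one, List.getElem?_eq_getElem h]
          rfl
        rw [hdrop, List.filter_cons, hk, htake, List.append_assoc]
        rfl
    · have hi' : i = l.length := by omega
      simp [hi']

-- B's fold invariant: after processing prefix `pre`, j = |filter pre| and the array is
-- filter pre followed by the untouched original tail.
theorem foldB_invariant :
    ∀ (s pre : List String),
      (s.foldl
        (fun (st : List String × Nat) x =>
          if x ≠ "the" ∧ x ≠ "a" ∧ x ≠ "an" then (st.1.set st.2 x, st.2 + 1) else st)
        (pre.filter pvKeep ++ (pre ++ s).drop (pre.filter pvKeep).length,
         (pre.filter pvKeep).length))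
      = ((pre ++ s).filter pvKeep ++ (pre ++ s).drop ((pre ++ s).filter pvKeep).length,
         ((pre ++ s).filter pvKeep).length) := by
  intro s
  induction s with
  | nil => intro pre; simp
  | cons x s ih =>
    intro pre
    have hassoc : pre ++ x :: s = (pre ++ [x]) ++ s := by simp
    by_cases hk : x ≠ "the" ∧ x ≠ "a" ∧ x ≠ "an"
    · have hkb : pvKeep x = true := by simp [pvKeep]; tauto
      have hfx : (pre ++ [x]).filter pvKeep = pre.filter pvKeep ++ [x] := by
        simp [List.filter_append, hkb]
      set F := pre.filter pvKeep with hF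
      set l := pre ++ x :: s with hl
      have hlt : F.length < l.length := by
        have h1 : F.length ≤ pre.length := List.length_filter_le _ _
        have h2 : pre.length < l.length := by
          rw [hl, List.length_append, List.length_cons]; omega
        omega
      have hdrop : l.drop F.length = l[F.length] :: l.drop (F.length + 1) :=
        List.drop_eq_getElem_cons hlt
      have hset : (F ++ l.drop F.length).set F.length x
          = (F ++ [x]) ++ l.drop (F.length + 1) := by
        rw [List.set_append_right _ _ (by omega), Nat.sub_self, hdrop,
          List.set_cons_zero, List.append_assoc]
        rfl
      simp only [List.foldl_cons, if_pos hk, hset]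
      have := ih (pre ++ [x])
      rw [hassoc]
      rw [← this, hfx]
      have hlen : (F ++ [x]).length = F.length + 1 := by
        rw [List.length_append]
        rfl
      rw [hlen]
    · have hkb : pvKeep x = false := by
        simp [pvKeep] at *; tauto
      have hfx : (pre ++ [x]).filter pvKeep = pre.filter pvKeep := by
        simp [List.filter_append, hkb]
      simp only [List.foldl_cons, if_neg hk]
      have := ih (pre ++ [x])
      rw [hassoc, ← this, hfx]

theorem remove_articles_alt_eq_filter (l : List String) :
    remove_articles_alt l = l.filter pvKeep := by
  unfold remove_articles_alt
  have h := foldB_invariant l []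
  simp only [List.nil_append, List.filter_nil, List.length_nil, List.drop_zero] at h
  rw [h]
  simp [List.take_append_of_le_length (le_refl _)]

-- ===== VERDICT (by name: the statement is the Claim_ definition above) =====
theorem remove_articles_spec : Claim_equal_remove_articles := by
  intro l _
  unfold Spec_remove_articles
  rw [remove_articles_alt_eq_filter]
  unfold remove_articles
  have h := removeArticlesLoop_eq_filter l.length l 0 (by omega) (by omega)
  simpa using h
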